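-- pv_equiv track=rewrite | github.com/bmharper/jstpdfextract | 2-text-to-csv.py | text_before_references
-- ===== SOURCE A (Python) =====
-- def text_before_references(txt):
--     lines = txt.splitlines()
--     first_ref = -1
--     last_ref = -1
--     for i, line in enumerate(lines):
--         line = line.strip()
--         if (line.endswith("References.") or line.endswith("REFERENCES") or line.endswith("References") or line.endswith("REFERENCES.") or line.endswith("LITERATURE  CITED.")
--                 or line.endswith("R E F E R E N C ES")):
--             #if first_ref != -1:
--             #    raise RuntimeError(f"Found duplicate reference section at line {first_ref} and {i}")
--             if first_ref == -1:
--                 first_ref = i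
--             last_ref = i
--     if last_ref == -1:
--         raise RuntimeError("Failed to find reference section")
--     return ' '.join(lines[:last_ref])
-- ===== SOURCE B (Python) =====
-- def _is_ref_header(line):
--     line = line.strip()
--     return (line.endswith("References.") or line.endswith("REFERENCES") or line.endswith("References")
--             or line.endswith("REFERENCES.") or line.endswith("LITERATURE  CITED.")
--             or line.endswith("R E F E R E N C ES"))
--
--
-- def text_before_references(txt):
--     # Pop lines off the end until the last reference-section header is found;
--     # what remains is exactly the text before it.
--     kept = txt.splitlines()
--     while kept:
--         line = kept.pop()
--         if _is_ref_header(line):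
--             return ' '.join(kept)
--     raise RuntimeError("Failed to find reference section")
-- ===== Notes on version B (the rewrite author's own statement) =====
-- stated objective: alternative
-- what changed: Replaces the forward scan over enumerate(lines) that tracks first/last matching indices and then slices by that index with a backward destructive search that pops lines off the end until the last header line is met and joins what remains.
import Mathlib
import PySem

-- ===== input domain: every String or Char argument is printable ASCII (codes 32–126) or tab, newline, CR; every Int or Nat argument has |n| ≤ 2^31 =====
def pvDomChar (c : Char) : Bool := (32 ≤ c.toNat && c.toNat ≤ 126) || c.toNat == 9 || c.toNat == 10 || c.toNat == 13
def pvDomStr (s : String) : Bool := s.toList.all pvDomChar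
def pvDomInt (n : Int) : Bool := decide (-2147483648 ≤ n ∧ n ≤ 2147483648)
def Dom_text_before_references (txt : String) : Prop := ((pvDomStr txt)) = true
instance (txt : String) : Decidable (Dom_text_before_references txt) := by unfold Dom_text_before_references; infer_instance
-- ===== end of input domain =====

-- B replaces A's forward full scan tracking the last header index by popping lines off the
-- end of the list until the last header is met (objective: alternative decomposition, same cost).
-- Both Pythons raise RuntimeError when no header line exists; Pre_ excludes exactly those inputs.

-- ===== PORT A =====
-- A's for-loop over enumerate(lines), extracted as a helper fold over the same (first_ref, last_ref) state.
def aLoop (lines : List String) : Int × Int :=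
  (PySem.List.enumerate lines 0).foldl
    (fun (acc : Int × Int) p =>
      let line := PySem.Str.strip p.2
      if PySem.Str.endswith line "References." || PySem.Str.endswith line "REFERENCES" ||
         PySem.Str.endswith line "References" || PySem.Str.endswith line "REFERENCES." ||
         PySem.Str.endswith line "LITERATURE  CITED." || PySem.Str.endswith line "R E F E R E N C ES" then
        ((if acc.1 == (-1 : Int) then p.1 else acc.1), p.1)
      else acc)
    (-1, -1)

def text_before_references (txt : String) : String :=
  let lines := PySem.Str.splitlines txt
  let st := aLoop lines
  if st.2 == (-1 : Int) then ""  -- Python: raise RuntimeError — excluded by Pre_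
  else PySem.Str.join " " (PySem.List.slice lines none (some st.2))

-- ===== PORT B =====
def isRefHeader (s : String) : Bool :=
  let line := PySem.Str.strip s
  PySem.Str.endswith line "References." || PySem.Str.endswith line "REFERENCES" ||
  PySem.Str.endswith line "References" || PySem.Str.endswith line "REFERENCES." ||
  PySem.Str.endswith line "LITERATURE  CITED." || PySem.Str.endswith line "R E F E R E N C ES"

-- B's while-loop: pop the last line; stop when it is a header.
def popSearch (kept : List String) : Option (List String) :=
  if h : kept = [] then none
  else
    let line := kept.getLast h
    let rest := kept.dropLast
    if isRefHeader line then some rest else popSearch rest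
termination_by kept.length
decreasing_by
  simp only [List.length_dropLast]
  have := List.length_pos_of_ne_nil h
  omega

def text_before_references_alt (txt : String) : String :=
  match popSearch (PySem.Str.splitlines txt) with
  | some kept => PySem.Str.join " " kept
  | none => ""  -- Python: raise RuntimeError — excluded by Pre_

-- ===== PRECONDITION & SPEC =====
-- Pre_: some line of the text matches a reference-section header; on other inputs both Pythons raise RuntimeError.
def Pre_text_before_references (txt : String) : Prop :=
  (PySem.Str.splitlines txt).any isRefHeader = true
instance (txt : String) : Decidable (Pre_text_before_references txt) := by
  unfold Pre_text_before_references; infer_instance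

def pvWitness_text_before_references : String := "intro text\nREFERENCES\nSmith 1999"

def Spec_text_before_references (txt : String) (out : String) : Prop := out = text_before_references_alt txt
instance (txt : String) (out : String) : Decidable (Spec_text_before_references txt out) := by unfold Spec_text_before_references; infer_instance

-- ===== CLAIM (what is proved, stated in full; the proofs are below) =====
def Claim_equal_text_before_references : Prop := ∀ (txt : String), Dom_text_before_references txt → Pre_text_before_references txt → Spec_text_before_references txt (text_before_references txt)

-- ===== LEMMAS AND PROOFS =====

theorem popSearch_nil : popSearch [] = none := by rw [popSearch]; rfl

theorem popSearch_append (l : List String) (x : String) :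
    popSearch (l ++ [x]) = if isRefHeader x then some l else popSearch l := by
  rw [popSearch]
  simp

theorem aLoop_append (l : List String) (x : String) :
    (aLoop (l ++ [x])).2 = if isRefHeader x then (l.length : Int) else (aLoop l).2 := by
  unfold aLoop
  rw [PySem.List.enumerate_append, List.foldl_append]
  simp only [isRefHeader]
  split_ifs <;> simp_all

theorem main_lemma (lines : List String) :
    (popSearch lines = none ∧ (aLoop lines).2 = -1) ∨
    (∃ kept, popSearch lines = some kept ∧ (aLoop lines).2 = (kept.length : Int) ∧
      lines.take kept.length = kept) := by
  induction lines using List.reverseRecOn with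
  | nil => left; exact ⟨popSearch_nil, rfl⟩
  | append_singleton l x ih =>
    rw [popSearch_append, aLoop_append]
    by_cases hx : isRefHeader x
    · right
      exact ⟨l, by simp [hx], by simp [hx], by simp⟩
    · simp only [hx]
      rcases ih with ⟨h1, h2⟩ | ⟨kept, h1, h2, h3⟩
      · left; exact ⟨h1, h2⟩
      · right
        refine ⟨kept, h1, h2, ?_⟩
        have hle : kept.length ≤ l.length := by
          have := congrArg List.length h3
          simp at this
          omega
        rw [List.take_append_of_le_length hle, h3]

theorem popSearch_none_iff (l : List String) :
    popSearch l = none ↔ l.any isRefHeader = false := by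
  induction l using List.reverseRecOn with
  | nil => simp [popSearch_nil]
  | append_singleton l x ih =>
    rw [popSearch_append]
    by_cases hx : isRefHeader x <;> simp [hx, ih]

-- ===== VERDICT (by name: the statement is the Claim_ definition above) =====
theorem text_before_references_spec : Claim_equal_text_before_references := by
  intro txt _ hpre
  unfold Spec_text_before_references text_before_references text_before_references_alt
  set lines := PySem.Str.splitlines txt with hlines
  rcases main_lemma lines with ⟨h1, _⟩ | ⟨kept, h1, h2, h3⟩
  · exact absurd ((popSearch_none_iff lines).mp h1) (by simp [Pre_text_before_references, ← hlines] at hpre ⊢; exact hpre)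
  · have hne : ((kept.length : Int) == (-1 : Int)) = false := by
      simp
    rw [h1]
    simp only [h2, hne, Bool.false_eq_true, if_false, PySem.List.slice_to_natCast, h3]
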